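-- pv_equiv track=rewrite | github.com/junhaz4/leetcode-notes | OA&Interview/Goldman.py | football_socres
-- ===== SOURCE A (Python) =====
-- def football_socres(teamA,teamB):
--   res = []
--   teamA.sort()
--   for score in teamB:
--     left, right = 0, len(teamA)-1
--     while left <= right:
--       mid = left + (right-left)//2
--       if teamA[mid] > score:
--         right = mid-1
--       else:
--         left = mid+1
--     res.append(left) #  find the first index of an element in A strictly greater than that element in B
--   return res
-- ===== SOURCE B (Python) =====
-- def football_socres(teamA, teamB):
--     # Like A, sorts teamA in place (same observable mutation).
--     # Two-pointer merge: visit teamB's positions in increasing score order,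
--     # advancing a single pointer j through the sorted teamA once.
--     teamA.sort()
--     res = [0] * len(teamB)
--     j = 0
--     for i in sorted(range(len(teamB)), key=lambda i: teamB[i]):
--         s = teamB[i]
--         while j < len(teamA) and teamA[j] <= s:
--             j += 1
--         res[i] = j
--     return res
-- ===== Notes on version B (the rewrite author's own statement) =====
-- stated objective: faster
-- what changed: Replaces A's per-query hand-written binary search with a two-pointer merge: teamB's positions are visited in increasing score order (via the built-in sort) while a single pointer sweeps the sorted teamA once, results scattered back by original index.
import Mathlib
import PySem

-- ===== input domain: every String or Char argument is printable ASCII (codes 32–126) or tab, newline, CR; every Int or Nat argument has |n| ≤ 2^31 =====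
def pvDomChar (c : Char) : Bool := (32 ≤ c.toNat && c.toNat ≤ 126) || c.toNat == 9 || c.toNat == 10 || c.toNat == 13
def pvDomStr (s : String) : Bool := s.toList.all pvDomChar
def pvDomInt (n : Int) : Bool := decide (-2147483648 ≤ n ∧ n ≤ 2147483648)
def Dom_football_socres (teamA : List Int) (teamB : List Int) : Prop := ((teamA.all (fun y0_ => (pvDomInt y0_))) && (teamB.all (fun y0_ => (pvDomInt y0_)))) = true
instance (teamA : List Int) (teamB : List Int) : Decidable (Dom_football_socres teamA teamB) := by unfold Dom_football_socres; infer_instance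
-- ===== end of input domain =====

-- B replaces A's per-query binary search with a direct counting scan; both sort teamA
-- in place in Python (same mutation); the equivalence proved here is about the return value.


-- ===== PORT A =====
-- A's inner while-loop: binary search for the first index strictly greater than score.
-- The 'none' branch of pyGet? is unreachable (0 ≤ left ≤ mid ≤ right < len whenever the loop runs).
def bsLoop (sA : List Int) (score : Int) (left right : Int) : Int :=
  if _h : left ≤ right then
    match PySem.List.pyGet? sA (left + PySem.Int.floordiv (right - left) 2) with
    | some v =>
      if v > score then
        bsLoop sA score left (left + PySem.Int.floordiv (right - left) 2 - 1)
      else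
        bsLoop sA score (left + PySem.Int.floordiv (right - left) 2 + 1) right
    | none => left
  else left
termination_by (right - left + 1).toNat
decreasing_by
  · have h2 := PySem.Int.floordiv_eq_ediv_of_pos (a := right - left) (b := 2) (by omega)
    rw [h2]; omega
  · have h2 := PySem.Int.floordiv_eq_ediv_of_pos (a := right - left) (b := 2) (by omega)
    rw [h2]; omega

def football_socres (teamA : List Int) (teamB : List Int) : List Int :=
  let tA := PySem.List.sorted teamA (fun x => x) false
  teamB.foldl (fun res score => res ++ [bsLoop tA score 0 ((tA.length : Int) - 1)]) []

-- ===== PORT B =====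
-- B's inner while-loop: advance j while teamA[j] <= s.
def advLoop (sA : List Int) (s : Int) (j : Nat) : Nat :=
  if h : j < sA.length then
    if sA[j] ≤ s then advLoop sA s (j + 1) else j
  else j
termination_by sA.length - j

-- teamB[i] with i drawn from range(len(teamB)) is always in range; pyGetD's default is unreachable.
def football_socres_alt (teamA : List Int) (teamB : List Int) : List Int :=
  let sA := PySem.List.sorted teamA (fun x => x) false
  let order := PySem.List.sorted (PySem.List.pyRange 0 (teamB.length : Int) 1)
      (fun i => PySem.List.pyGetD teamB i 0) false
  (order.foldl (fun (st : List Int × Nat) i =>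
      let s := PySem.List.pyGetD teamB i 0
      let j := advLoop sA s st.2
      (PySem.List.pySetD st.1 i (j : Int), j))
    (List.replicate teamB.length 0, 0)).1

-- ===== PRECONDITION & SPEC =====
def Spec_football_socres (teamA : List Int) (teamB : List Int) (out : List Int) : Prop := out = football_socres_alt teamA teamB
instance (teamA : List Int) (teamB : List Int) (out : List Int) : Decidable (Spec_football_socres teamA teamB out) := by unfold Spec_football_socres; infer_instance

-- ===== CLAIM (what is proved, stated in full; the proofs are below) =====
def Claim_equal_football_socres : Prop := ∀ (teamA : List Int) (teamB : List Int), Dom_football_socres teamA teamB → Spec_football_socres teamA teamB (football_socres teamA teamB)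

-- ===== LEMMAS AND PROOFS =====

-- countP equals n when exactly the first n elements satisfy p.
theorem countP_split (l : List Int) (p : Int → Bool) (n : Nat) (hn : n ≤ l.length)
    (h1 : ∀ i (h : i < l.length), i < n → p l[i] = true)
    (h2 : ∀ i (h : i < l.length), n ≤ i → p l[i] = false) :
    l.countP p = n := by
  induction l generalizing n with
  | nil => simp_all
  | cons a t ih =>
    cases n with
    | zero =>
      rw [List.countP_eq_zero]
      intro x hx
      obtain ⟨i, h, rfl⟩ := List.getElem_of_mem hx
      simp [h2 i h (by omega)]
    | succ m =>
      have ha : p a = true := h1 0 (by simp) (by omega)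
      simp [ha]
      have := ih m (by simpa using hn)
        (fun i h hi => h1 (i+1) (by simpa using Nat.succ_lt_succ h) (by omega))
        (fun i h hi => h2 (i+1) (by simpa using Nat.succ_lt_succ h) (by omega))
      omega
  
-- The binary-search loop computes the count of elements ≤ score, on a sorted list.
theorem bsLoop_eq (sA : List Int) (score : Int)
    (hs : sA.Pairwise (fun a b => a ≤ b)) :
    ∀ (left right : Int), 0 ≤ left → left ≤ right + 1 → right ≤ (sA.length : Int) - 1 →
    (∀ i (h : i < sA.length), (i : Int) < left → sA[i] ≤ score) →
    (∀ i (h : i < sA.length), right < (i : Int) → score < sA[i]) →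
    bsLoop sA score left right = ((sA.countP (fun a => a ≤ score)) : Int) := by
  have hmono : ∀ i j (hi : i < sA.length) (hj : j < sA.length), i ≤ j → sA[i] ≤ sA[j] := by
    intro i j hi hj hij
    rcases Nat.lt_or_ge i j with h | h
    · exact (List.pairwise_iff_getElem.mp hs) i j hi hj h
    · have : i = j := by omega
      subst this; exact le_refl _
  intro left right
  induction left, right using bsLoop.induct sA score with
  | case1 left right hlr v hget hv ih =>
    intro h0 hle hlen hlo hhi
    -- mid in range
    have h2 := PySem.Int.floordiv_eq_ediv_of_pos (a := right - left) (b := 2) (by omega)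
    set mid := left + PySem.Int.floordiv (right - left) 2 with hmid
    have hmb : left ≤ mid ∧ mid ≤ right := by rw [hmid, h2]; omega
    have hmr : mid.toNat < sA.length := by omega
    have hvv : v = sA[mid.toNat] := by
      have := PySem.List.pyGet?_of_nonneg (xs := sA) (i := mid) (by omega)
      rw [this, List.getElem?_eq_getElem hmr] at hget
      exact (Option.some_inj.mp hget).symm
    rw [bsLoop]
    simp only [dif_pos hlr, ← hmid, hget, if_pos hv]
    apply ih (by omega) (by omega) (by omega) hlo
    intro i h hi
    have : sA[mid.toNat] ≤ sA[i] := hmono _ _ hmr h (by omega)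
    have : score < sA[mid.toNat] := by omega
    omega
  | case2 left right hlr v hget hv ih =>
    intro h0 hle hlen hlo hhi
    have h2 := PySem.Int.floordiv_eq_ediv_of_pos (a := right - left) (b := 2) (by omega)
    set mid := left + PySem.Int.floordiv (right - left) 2 with hmid
    have hmb : left ≤ mid ∧ mid ≤ right := by rw [hmid, h2]; omega
    have hmr : mid.toNat < sA.length := by omega
    have hvv : v = sA[mid.toNat] := by
      have := PySem.List.pyGet?_of_nonneg (xs := sA) (i := mid) (by omega)
      rw [this, List.getElem?_eq_getElem hmr] at hget
      exact (Option.some_inj.mp hget).symm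
    rw [bsLoop]
    simp only [dif_pos hlr, ← hmid, hget, if_neg hv]
    apply ih (by omega) (by omega) hlen
    · intro i h hi
      have : sA[i] ≤ sA[mid.toNat] := hmono _ _ h hmr (by omega)
      omega
    · exact hhi
  | case3 left right hlr hget =>
    -- unreachable none branch: mid is in range
    intro h0 hle hlen hlo hhi
    exfalso
    have h2 := PySem.Int.floordiv_eq_ediv_of_pos (a := right - left) (b := 2) (by omega)
    set mid := left + PySem.Int.floordiv (right - left) 2 with hmid
    have hmb : left ≤ mid ∧ mid ≤ right := by rw [hmid, h2]; omega
    have hmr : mid.toNat < sA.length := by omega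
    have := PySem.List.pyGet?_of_nonneg (xs := sA) (i := mid) (by omega)
    rw [this, List.getElem?_eq_getElem hmr] at hget
    simp at hget
  | case4 left right hlr =>
    intro h0 hle hlen hlo hhi
    rw [bsLoop]
    simp only [dif_neg hlr]
    have hc : sA.countP (fun a => a ≤ score) = left.toNat := by
      apply countP_split _ _ _ (by omega)
      · intro i h hi
        simpa using hlo i h (by omega)
      · intro i h hi
        simpa using hhi i h (by omega)
    rw [hc]; omega

theorem foldl_append_map (f : Int → Int) (l : List Int) (acc : List Int) :
    l.foldl (fun res score => res ++ [f score]) acc = acc ++ l.map f := by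
  induction l generalizing acc with
  | nil => simp
  | cons a t ih => simp [ih, List.append_assoc]

-- In a sorted list, an element ≤ s at index i forces at least i+1 elements ≤ s.
theorem lt_countP_of_le (sA : List Int) (s : Int) (hs : sA.Pairwise (fun a b => a ≤ b))
    (i : Nat) (hi : i < sA.length) (h : sA[i] ≤ s) :
    i < sA.countP (fun a => a ≤ s) := by
  have hsplit : sA = sA.take (i+1) ++ sA.drop (i+1) := (List.take_append_drop _ _).symm
  have hlen : (sA.take (i+1)).length = i + 1 := by simp; omega
  have hall : (sA.take (i+1)).countP (fun a => a ≤ s) = i + 1 := by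
    have h0 : (sA.take (i+1)).countP (fun a => a ≤ s) = (sA.take (i+1)).length := by
      rw [List.countP_eq_length]
      intro x hx
      obtain ⟨k, hk, rfl⟩ := List.getElem_of_mem hx
      rw [List.getElem_take]
      have hk2 : k < sA.length := by simp at hk; omega
      have hk' : k ≤ i := by simp at hk; omega
      have hki : sA[k] ≤ sA[i] := by
        rcases Nat.lt_or_ge k i with hlt | hge
        · exact (List.pairwise_iff_getElem.mp hs) k i (by omega) hi hlt
        · have : k = i := by omega
          subst this; exact le_refl _
      simpa using le_trans hki h
    rw [h0, hlen]
  calc i < i + 1 := by omega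
    _ ≤ (sA.take (i+1)).countP (fun a => a ≤ s) + (sA.drop (i+1)).countP (fun a => a ≤ s) := by omega
    _ = sA.countP (fun a => a ≤ s) := by rw [← List.countP_append, ← hsplit]

-- In a sorted list, an element > s at index i caps the count of elements ≤ s at i.
theorem countP_le_of_lt (sA : List Int) (s : Int) (hs : sA.Pairwise (fun a b => a ≤ b))
    (i : Nat) (hi : i < sA.length) (h : s < sA[i]) :
    sA.countP (fun a => a ≤ s) ≤ i := by
  have hsplit : sA = sA.take i ++ sA.drop i := (List.take_append_drop _ _).symm
  have hdrop : (sA.drop i).countP (fun a => a ≤ s) = 0 := by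
    rw [List.countP_eq_zero]
    intro x hx
    obtain ⟨k, hk, rfl⟩ := List.getElem_of_mem hx
    rw [List.getElem_drop]
    have hikl : i + k < sA.length := by simp at hk; omega
    have hik : sA[i] ≤ sA[i+k] := by
      rcases Nat.lt_or_ge i (i+k) with hlt | hge
      · exact (List.pairwise_iff_getElem.mp hs) i (i+k) hi hikl hlt
      · have hk0 : k = 0 := by omega
        subst hk0; simp
    simp; omega
  have htake : (sA.take i).countP (fun a => a ≤ s) ≤ i := by
    calc (sA.take i).countP (fun a => a ≤ s) ≤ (sA.take i).length := List.countP_le_length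
      _ ≤ i := by simp
  calc sA.countP (fun a => a ≤ s)
      = (sA.take i).countP (fun a => a ≤ s) + (sA.drop i).countP (fun a => a ≤ s) := by
        rw [← List.countP_append, ← hsplit]
    _ ≤ i := by omega

-- The pointer advance lands exactly on the count, starting from any j below it.
theorem advLoop_eq (sA : List Int) (s : Int) (hs : sA.Pairwise (fun a b => a ≤ b)) :
    ∀ j : Nat, j ≤ sA.countP (fun a => a ≤ s) → advLoop sA s j = sA.countP (fun a => a ≤ s) := by
  intro j
  induction j using advLoop.induct sA s with
  | case1 j hj hle ih =>
    intro _
    have : j < sA.countP (fun a => a ≤ s) := lt_countP_of_le sA s hs j hj hle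
    rw [advLoop]
    simp only [dif_pos hj, if_pos hle]
    exact ih (by omega)
  | case2 j hj hgt =>
    intro hle
    have := countP_le_of_lt sA s hs j hj (by omega)
    rw [advLoop]
    simp only [dif_pos hj, if_neg hgt]
    omega
  | case3 j hj =>
    intro hle
    have : sA.countP (fun a => a ≤ s) ≤ sA.length := List.countP_le_length
    rw [advLoop]
    simp only [dif_neg hj]
    omega

-- The scatter loop: processed positions hold their counts, untouched ones keep res's value.
theorem fold_inv (teamB sA : List Int) (hs : sA.Pairwise (fun a b => a ≤ b)) :
    ∀ (rest : List Int) (res : List Int) (j : Nat),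
    res.length = teamB.length →
    rest.Nodup →
    List.Pairwise (fun a b => PySem.List.pyGetD teamB a 0 ≤ PySem.List.pyGetD teamB b 0) rest →
    (∀ i ∈ rest, 0 ≤ i ∧ i < (teamB.length : Int)) →
    (∀ i ∈ rest, j ≤ sA.countP (fun a => a ≤ PySem.List.pyGetD teamB i 0)) →
    ((rest.foldl (fun (st : List Int × Nat) i =>
        (PySem.List.pySetD st.1 i ((advLoop sA (PySem.List.pyGetD teamB i 0) st.2 : Nat) : Int),
         advLoop sA (PySem.List.pyGetD teamB i 0) st.2)) (res, j)).1.length = teamB.length ∧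
      ∀ k : Nat, (hk : k < teamB.length) →
        (rest.foldl (fun (st : List Int × Nat) i =>
          (PySem.List.pySetD st.1 i ((advLoop sA (PySem.List.pyGetD teamB i 0) st.2 : Nat) : Int),
           advLoop sA (PySem.List.pyGetD teamB i 0) st.2)) (res, j)).1[k]? =
        if (k : Int) ∈ rest then some ((sA.countP (fun a => a ≤ teamB[k]'(by omega)) : Int))
        else res[k]?) := by
  intro rest
  induction rest with
  | nil =>
    intro res j hlen _ _ _ _
    refine ⟨hlen, ?_⟩
    intro k hk
    simp
  | cons i rest' ih =>
    intro res j hlen hnd hpw hbd hj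
    have hib := hbd i (by simp)
    have hkey : PySem.List.pyGetD teamB i 0 = teamB[i.toNat]'(by omega) :=
      PySem.List.pyGetD_eq_getElem (xs := teamB) (i := i) (d := 0) (by omega) (by omega)
    have hadv : advLoop sA (PySem.List.pyGetD teamB i 0) j
        = sA.countP (fun a => a ≤ PySem.List.pyGetD teamB i 0) :=
      advLoop_eq sA _ hs j (hj i (by simp))
    have hset : PySem.List.pySetD res i
          ((advLoop sA (PySem.List.pyGetD teamB i 0) j : Nat) : Int)
        = res.set i.toNat ((advLoop sA (PySem.List.pyGetD teamB i 0) j : Nat) : Int) :=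
      PySem.List.pySetD_of_nonneg res _ (by omega)
    simp only [List.foldl_cons]
    have hmono : ∀ i' ∈ rest',
        advLoop sA (PySem.List.pyGetD teamB i 0) j
          ≤ sA.countP (fun a => a ≤ PySem.List.pyGetD teamB i' 0) := by
      intro i' hi'
      rw [hadv]
      have hle : PySem.List.pyGetD teamB i 0 ≤ PySem.List.pyGetD teamB i' 0 :=
        (List.pairwise_cons.mp hpw).1 i' hi'
      exact List.countP_mono_left (by intro a _ ha; simp at ha ⊢; omega)
    obtain ⟨hlen', hspec⟩ := ih
      (res.set i.toNat ((advLoop sA (PySem.List.pyGetD teamB i 0) j : Nat) : Int))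
      (advLoop sA (PySem.List.pyGetD teamB i 0) j)
      (by simpa using hlen)
      hnd.of_cons
      (List.pairwise_cons.mp hpw).2
      (fun i' hi' => hbd i' (by simp [hi']))
      hmono
    rw [hset]
    refine ⟨hlen', ?_⟩
    intro k hk
    rw [hspec k hk]
    by_cases hki : (k : Int) = i
    · have hknotin : (k : Int) ∉ rest' := by
        rw [hki]; exact (List.nodup_cons.mp hnd).1
      have hik : i.toNat = k := by omega
      subst hik
      rw [if_neg hknotin, if_pos (by simp [hki])]
      rw [List.getElem?_set_self (by omega)]
      rw [hadv, hkey]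
    · have hne : i.toNat ≠ k := by omega
      by_cases hkr : (k : Int) ∈ rest'
      · rw [if_pos hkr, if_pos (by simp [hkr])]
      · rw [if_neg hkr, if_neg (by simp [hki, hkr]), List.getElem?_set_ne hne]

-- ===== VERDICT (by name: the statement is the Claim_ definition above) =====
theorem football_socres_spec : Claim_equal_football_socres := by
  intro teamA teamB _
  unfold Spec_football_socres football_socres football_socres_alt
  simp only
  rw [foldl_append_map (fun score =>
      bsLoop (PySem.List.sorted teamA (fun x => x) false) score 0
        ((PySem.List.sorted teamA (fun x => x) false).length - 1)), List.nil_append]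
  have hs : (PySem.List.sorted teamA (fun x => x) false).Pairwise (fun a b => a ≤ b) :=
    PySem.List.sorted_pairwise teamA (fun x => x)
  set sA := PySem.List.sorted teamA (fun x => x) false with hsA
  have hA : ∀ score, bsLoop sA score 0 ((sA.length : Int) - 1)
      = ((sA.countP (fun a => a ≤ score)) : Int) := fun score =>
    bsLoop_eq sA score hs 0 _ (by omega) (by omega) (by omega)
      (by intro i h hi; omega) (by intro i h hi; exfalso; omega)
  set order := PySem.List.sorted (PySem.List.pyRange 0 (teamB.length : Int) 1)
      (fun i => PySem.List.pyGetD teamB i 0) false with horder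
  have hperm : order.Perm (PySem.List.pyRange 0 (teamB.length : Int) 1) :=
    PySem.List.sorted_perm _ _ _
  have hnd : order.Nodup := hperm.nodup_iff.mpr (PySem.List.nodup_pyRange_one _ _)
  have hmem : ∀ x : Int, x ∈ order ↔ 0 ≤ x ∧ x < (teamB.length : Int) := by
    intro x
    rw [hperm.mem_iff, PySem.List.mem_pyRange_one]
  have hpw : List.Pairwise (fun a b => PySem.List.pyGetD teamB a 0 ≤ PySem.List.pyGetD teamB b 0)
      order := PySem.List.sorted_pairwise _ _
  obtain ⟨hlen, hspec⟩ := fold_inv teamB sA hs order (List.replicate teamB.length 0) 0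
    (by simp) hnd hpw (fun i hi => (hmem i).mp hi) (fun i hi => by omega)
  apply List.ext_getElem?
  intro k
  by_cases hk : k < teamB.length
  · rw [hspec k hk, if_pos ((hmem k).mpr (by omega))]
    rw [List.getElem?_map, List.getElem?_eq_getElem hk]
    simp [hA]
  · have h1 : (teamB.map (fun score => bsLoop sA score 0 ((sA.length : Int) - 1)))[k]? = none := by
      rw [List.getElem?_eq_none_iff]; simp; omega
    rw [h1]
    symm
    rw [List.getElem?_eq_none_iff, hlen]
    omega
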